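-- pv_equiv track=rewrite | github.com/mariusioo/password_generator_imn | gui_generate_password.py | has_symbols
-- ===== SOURCE A (Python) =====
-- def has_symbols(password: str) -> bool:
--     symbols = "!@#$%&_?"
--     has_symbols = False
--     for ch in password:
--         if ch in symbols:
--             has_symbols = True
--             break
--     return has_symbols
-- ===== SOURCE B (Python) =====
-- def has_symbols(password: str) -> bool:
--     return any(sym in password for sym in "!@#$%&_?")
-- ===== Notes on version B (the rewrite author's own statement) =====
-- stated objective: faster
-- what changed: Instead of scanning the password character by character with a flag and break, testing each char for membership in the symbol string, B iterates over the fixed symbol alphabet and substring-tests each symbol against the password via any(), so the long scan happens inside the built-in containment operator instead of a Python-level loop.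
import Mathlib
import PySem

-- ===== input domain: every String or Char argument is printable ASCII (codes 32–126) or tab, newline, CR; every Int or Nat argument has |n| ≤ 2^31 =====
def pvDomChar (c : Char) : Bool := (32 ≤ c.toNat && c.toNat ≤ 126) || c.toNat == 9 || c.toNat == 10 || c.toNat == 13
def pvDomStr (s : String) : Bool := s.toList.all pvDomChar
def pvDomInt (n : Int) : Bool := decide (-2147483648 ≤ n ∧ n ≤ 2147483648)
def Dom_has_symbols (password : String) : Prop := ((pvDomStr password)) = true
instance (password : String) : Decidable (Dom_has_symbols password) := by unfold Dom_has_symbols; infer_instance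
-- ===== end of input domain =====

-- B inverts the traversal: it iterates the fixed symbol alphabet and substring-tests each
-- symbol against the password, instead of A's flag-and-break scan over the password.
-- Objective: faster (the long scan runs inside the substring test, not a per-char Python loop); same return value everywhere.

-- ===== PORT A =====
-- A's loop over the password with a flag and break: recursion that returns true at the
-- first character found in the symbol string, carrying no state after the break.
def hasSymbolsLoop (symbols : List Char) : List Char → Bool
  | [] => false
  | c :: rest => if symbols.contains c then true else hasSymbolsLoop symbols rest

def has_symbols (password : String) : Bool :=
  hasSymbolsLoop "!@#$%&_?".toList password.toList

-- ===== PORT B =====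
-- any(sym in password for sym in "!@#$%&_?"): iterate the symbol alphabet, each
-- single-char 'in' test a containment scan of the whole password.
def has_symbols_alt (password : String) : Bool :=
  "!@#$%&_?".toList.any (fun sym => password.toList.contains sym)

-- ===== PRECONDITION & SPEC =====
def Spec_has_symbols (password : String) (out : Bool) : Prop := out = has_symbols_alt password
instance (password : String) (out : Bool) : Decidable (Spec_has_symbols password out) := by unfold Spec_has_symbols; infer_instance

-- ===== CLAIM (what is proved, stated in full; the proofs are below) =====
def Claim_equal_has_symbols : Prop := ∀ (password : String), Dom_has_symbols password → Spec_has_symbols password (has_symbols password)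

-- ===== LEMMAS AND PROOFS =====
-- A's break-loop is 'some password character lies in symbols'.
theorem hasSymbolsLoop_eq_any (symbols : List Char) (l : List Char) :
    hasSymbolsLoop symbols l = l.any (fun c => symbols.contains c) := by
  induction l with
  | nil => rfl
  | cons c rest ih =>
    simp only [hasSymbolsLoop, List.any_cons, ih]
    by_cases h : symbols.contains c <;> simp [h]

-- ===== VERDICT (by name: the statement is the Claim_ definition above) =====
theorem has_symbols_spec : Claim_equal_has_symbols := by
  intro password _
  unfold Spec_has_symbols has_symbols has_symbols_alt
  rw [hasSymbolsLoop_eq_any]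
  rw [Bool.eq_iff_iff]
  simp only [List.any_eq_true, List.contains_iff_mem, List.elem_iff]
  constructor <;> rintro ⟨x, hx, hx'⟩ <;> exact ⟨x, hx', hx⟩
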